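-- pv_equiv track=rewrite | github.com/QilinWang/CNN_limit_order_book | model_lob.py | index_combine_AABB_into_ABAB
-- ===== SOURCE A (Python) =====
-- def index_combine_AABB_into_ABAB(combine_length):
--
--     assert combine_length % 2 == 0
--
--     single_length = combine_length//2 #* e.g. 20
--     a = [i for i in range(0,single_length)] #* [0,1,2,3...19]
--     b = [i + single_length for i in range(0,single_length)] #* [20, 21, ..., 39]
--     zip_list = [[x, y] for x,y in zip(a,b)] #* [0, 20], [1,21], ... [19, 39]
--     flat_list_c = [item for sublist in zip_list for item in sublist]
--     return flat_list_c
-- ===== SOURCE B (Python) =====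
-- def index_combine_AABB_into_ABAB(combine_length):
--     assert combine_length % 2 == 0
--     single_length = combine_length // 2
--     return [j // 2 if j % 2 == 0 else j // 2 + single_length
--             for j in range(combine_length)]
-- ===== Notes on version B (the rewrite author's own statement) =====
-- stated objective: idiomatic
-- what changed: Replaces the build-two-lists / zip / flatten pipeline by a single comprehension over the output positions, computing each element from its index parity.
import Mathlib
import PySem

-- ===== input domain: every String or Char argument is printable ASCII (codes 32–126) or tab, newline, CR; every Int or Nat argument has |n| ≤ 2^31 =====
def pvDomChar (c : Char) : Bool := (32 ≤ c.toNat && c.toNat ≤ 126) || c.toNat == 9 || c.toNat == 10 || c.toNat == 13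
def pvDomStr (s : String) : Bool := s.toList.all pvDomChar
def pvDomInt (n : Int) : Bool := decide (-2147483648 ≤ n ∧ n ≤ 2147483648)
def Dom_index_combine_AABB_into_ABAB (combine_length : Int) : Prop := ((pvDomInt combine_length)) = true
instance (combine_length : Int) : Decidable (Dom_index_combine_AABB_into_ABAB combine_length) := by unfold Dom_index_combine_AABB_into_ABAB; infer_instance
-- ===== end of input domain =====

-- B replaces the zip-and-flatten of two precomputed index lists by one pass over the
-- output positions, computing each element from its index parity (idiomatic, same cost).

-- ===== PORT A =====
def index_combine_AABB_into_ABAB (combine_length : Int) : List Int :=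
  let single_length := PySem.Int.floordiv combine_length 2
  let a := PySem.List.pyRange 0 single_length 1
  let b := (PySem.List.pyRange 0 single_length 1).map (fun i => i + single_length)
  let zip_list := (a.zip b).map (fun p => [p.1, p.2])
  zip_list.flatten

-- ===== PORT B =====
def index_combine_AABB_into_ABAB_alt (combine_length : Int) : List Int :=
  let single_length := PySem.Int.floordiv combine_length 2
  (PySem.List.pyRange 0 combine_length 1).map (fun j =>
    if PySem.Int.mod j 2 = 0 then PySem.Int.floordiv j 2
    else PySem.Int.floordiv j 2 + single_length)

-- ===== PRECONDITION & SPEC =====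
-- Pre_: A's assert requires an even argument; on odd input A raises AssertionError.
def Pre_index_combine_AABB_into_ABAB (combine_length : Int) : Prop :=
  PySem.Int.mod combine_length 2 = 0
instance (combine_length : Int) : Decidable (Pre_index_combine_AABB_into_ABAB combine_length) := by
  unfold Pre_index_combine_AABB_into_ABAB; infer_instance
def pvWitness_index_combine_AABB_into_ABAB : Int := (6)
def Spec_index_combine_AABB_into_ABAB (combine_length : Int) (out : List Int) : Prop := out = index_combine_AABB_into_ABAB_alt combine_length
instance (combine_length : Int) (out : List Int) : Decidable (Spec_index_combine_AABB_into_ABAB combine_length out) := by unfold Spec_index_combine_AABB_into_ABAB; infer_instance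

-- ===== CLAIM (what is proved, stated in full; the proofs are below) =====
def Claim_equal_index_combine_AABB_into_ABAB : Prop := ∀ (combine_length : Int), Dom_index_combine_AABB_into_ABAB combine_length → Pre_index_combine_AABB_into_ABAB combine_length → Spec_index_combine_AABB_into_ABAB combine_length (index_combine_AABB_into_ABAB combine_length)

-- ===== LEMMAS AND PROOFS =====

lemma key (S : Int) : ∀ (n : Nat),
    (PySem.List.pyRange 0 (2 * (n : Int)) 1).map (fun j =>
      if PySem.Int.mod j 2 = 0 then PySem.Int.floordiv j 2
      else PySem.Int.floordiv j 2 + S)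
    = ((PySem.List.pyRange 0 (n : Int) 1).map (fun i => [i, i + S])).flatten := by
  intro n
  induction n with
  | zero => simp [PySem.List.pyRange_one_eq_nil]
  | succ m ih =>
    have h1 : (2 : Int) * ((m : Int) + 1) = (2 * (m : Int) + 1) + 1 := by ring
    push_cast
    rw [h1, PySem.List.pyRange_one_succ_right (by positivity),
        PySem.List.pyRange_one_succ_right (by positivity),
        PySem.List.pyRange_one_succ_right (by positivity)]
    simp only [List.map_append, List.flatten_append, List.append_assoc]
    rw [ih]
    congr 1
    simp
    omega

-- ===== VERDICT (by name: the statement is the Claim_ definition above) =====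
theorem index_combine_AABB_into_ABAB_spec : Claim_equal_index_combine_AABB_into_ABAB := by
  intro cl _ hpre
  unfold Pre_index_combine_AABB_into_ABAB at hpre
  unfold Spec_index_combine_AABB_into_ABAB
  unfold index_combine_AABB_into_ABAB index_combine_AABB_into_ABAB_alt
  simp only []
  rcases le_or_gt cl 0 with hle | hpos
  · have hs : PySem.Int.floordiv cl 2 ≤ 0 := by
      rw [PySem.Int.floordiv_eq_ediv_of_pos (by norm_num)]; omega
    rw [PySem.List.pyRange_one_eq_nil hle, PySem.List.pyRange_one_eq_nil hs]
    simp
  · -- cl is a positive even integer: cl = 2 * n with n = (cl / 2).toNat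
    have hmod : cl % 2 = 0 := by
      rw [PySem.Int.mod_eq_emod_of_pos (by norm_num)] at hpre; exact hpre
    set n : Nat := (cl / 2).toNat with hn
    have hcl : cl = 2 * (n : Int) := by omega
    have hsd : PySem.Int.floordiv cl 2 = (n : Int) := by
      rw [PySem.Int.floordiv_eq_ediv_of_pos (by norm_num)]; omega
    rw [hsd, hcl, key]
    -- A side: zip a (a.map f) = a.map (x, f x); flatten of map pairs
    have hz : ∀ (l : List Int) (f : Int → Int),
        l.zip (l.map f) = l.map (fun x => (x, f x)) := by
      intro l f
      rw [show l.zip (l.map f) = (l.map id).zip (l.map f) by simp,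
          List.zip_map']
      simp
    rw [hz]
    simp [Function.comp_def]
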